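-- pv_equiv track=rewrite | github.com/ThomasBollmeier/advent-of-code-2023 | 10/main.py | calc_enclosed
-- ===== SOURCE A (Python) =====
-- class Pipe:
--   NS = "|"
--   EW = "-"
--   SE = "F"
--   SW = "7"
--   NW = "J"
--   NE = "L"
--   GROUND = "."
--   START = "S"
--
-- def calc_enclosed(line):
--   ret = 0
--   pairs = list(zip(line, line[1:]))
--   state = (0, 1) # left outside, right inside
--   for pair in pairs:
--     left_pipe = pair[0][1]
--     right_pipe = pair[1][1]
--     next_state = switch(state) \
--         if (left_pipe, right_pipe) not in {(Pipe.SE, Pipe.NW), (Pipe.NE, Pipe.SW)} \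
--         else state
--     if state[1] and next_state[0]: # both inside
--       if right_pipe not in {Pipe.NW, Pipe.SW}:
--         num_enclosed = pair[1][0] - pair[0][0] - 1
--         ret += num_enclosed
--     state = next_state
--
--   return ret
--
-- def switch(state):
--   left, right = state
--   return ((left + 1) % 2, (right + 1) % 2)
-- ===== SOURCE B (Python) =====
-- def calc_enclosed(line):
--     # stage 1: collect the crossing pairs (adjacent cells whose junction flips parity)
--     cross = [(a, b) for a, b in zip(line, line[1:])
--              if (a[1], b[1]) not in {("F", "J"), ("L", "7")}]
--     # stage 2: the even-indexed crossings are the ones made while inside; sum their gaps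
--     total = 0
--     while cross:
--         a, b = cross[0]
--         if b[1] not in ("J", "7"):
--             total += b[0] - a[0] - 1
--         cross = cross[2:]
--     return total
-- ===== Notes on version B (the rewrite author's own statement) =====
-- stated objective: alternative
-- what changed: Replaces A's stateful scan with a toggling two-bit state tuple by a stateless two-stage computation: first filter the adjacent pairs down to the list of parity-flipping crossings, then sum the gaps of every second (even-indexed, i.e. made-while-inside) crossing by consuming that list two at a time.
import Mathlib
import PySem

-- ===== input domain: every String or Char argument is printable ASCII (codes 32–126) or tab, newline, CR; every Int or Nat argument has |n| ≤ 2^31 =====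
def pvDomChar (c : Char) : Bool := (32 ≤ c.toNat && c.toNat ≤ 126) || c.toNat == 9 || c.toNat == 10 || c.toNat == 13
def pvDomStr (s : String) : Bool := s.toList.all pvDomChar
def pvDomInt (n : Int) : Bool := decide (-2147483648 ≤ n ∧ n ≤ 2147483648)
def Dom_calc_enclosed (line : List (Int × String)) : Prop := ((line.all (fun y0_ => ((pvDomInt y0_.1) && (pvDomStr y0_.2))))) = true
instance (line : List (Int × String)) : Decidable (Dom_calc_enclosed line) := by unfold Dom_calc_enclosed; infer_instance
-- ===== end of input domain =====

-- B replaces A's stateful parity scan by a stateless two-stage computation: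
-- filter the crossings first, then sum the gaps of every second crossing.

-- ===== PORT A =====
-- helper: Python's switch(state) = ((left+1)%2, (right+1)%2)
def pySwitch (s : Int × Int) : Int × Int :=
  (PySem.Int.mod (s.1 + 1) 2, PySem.Int.mod (s.2 + 1) 2)

def calc_enclosed (line : List (Int × String)) : Int :=
  -- pairs = list(zip(line, line[1:]))
  let pairs := line.zip (PySem.List.slice line (some 1) none)
  let r := pairs.foldl (fun (acc : Int × (Int × Int)) pair =>
    let ret := acc.1
    let state := acc.2
    let left_pipe := pair.1.2
    let right_pipe := pair.2.2
    let next_state :=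
      if ¬((left_pipe, right_pipe) = ("F", "J") ∨ (left_pipe, right_pipe) = ("L", "7"))
      then pySwitch state else state
    let ret :=
      if state.2 ≠ 0 ∧ next_state.1 ≠ 0 then
        if ¬(right_pipe = "J" ∨ right_pipe = "7") then
          ret + (pair.2.1 - pair.1.1 - 1)
        else ret
      else ret
    (ret, next_state)) (0, (0, 1))
  r.1

-- ===== PORT B =====
-- stage-2 while loop of Source B: consume the crossing list two entries at a time.
-- 'cross = cross[2:]' on the nonempty list ab :: rest is rest.drop 1 (slice with
-- nonnegative literal start = drop; exact here).
def sumEvenAux : List ((Int × String) × (Int × String)) → Int → Int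
  | [], total => total
  | ab :: rest, total =>
      sumEvenAux (rest.drop 1)
        (if ¬(ab.2.2 = "J" ∨ ab.2.2 = "7") then total + (ab.2.1 - ab.1.1 - 1) else total)
termination_by cs _ => cs.length
decreasing_by simp

def calc_enclosed_alt (line : List (Int × String)) : Int :=
  -- stage 1: cross = [(a, b) for a, b in zip(line, line[1:]) if (a[1], b[1]) not in {...}]
  let cross := (line.zip (PySem.List.slice line (some 1) none)).filter
      (fun ab => decide (¬((ab.1.2, ab.2.2) = ("F", "J") ∨ (ab.1.2, ab.2.2) = ("L", "7"))))
  -- stage 2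
  sumEvenAux cross 0

-- ===== PRECONDITION & SPEC =====
def Spec_calc_enclosed (line : List (Int × String)) (out : Int) : Prop := out = calc_enclosed_alt line
instance (line : List (Int × String)) (out : Int) : Decidable (Spec_calc_enclosed line out) := by unfold Spec_calc_enclosed; infer_instance

-- ===== CLAIM =====
def Claim_equal_calc_enclosed : Prop := ∀ (line : List (Int × String)), Dom_calc_enclosed line → Spec_calc_enclosed line (calc_enclosed line)

-- ===== LEMMAS AND PROOFS =====
-- unfolding equations of sumEvenAux (well-founded recursion)
lemma sumEvenAux_nil (t : Int) : sumEvenAux [] t = t := by rw [sumEvenAux]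

lemma sumEvenAux_cons (ab : (Int × String) × (Int × String))
    (rest : List ((Int × String) × (Int × String))) (t : Int) :
    sumEvenAux (ab :: rest) t
      = sumEvenAux (rest.drop 1)
          (if ¬(ab.2.2 = "J" ∨ ab.2.2 = "7") then t + (ab.2.1 - ab.1.1 - 1) else t) := by
  rw [sumEvenAux]

-- A's loop body, named for the invariant
def stepA (acc : Int × (Int × Int)) (pair : (Int × String) × (Int × String)) : Int × (Int × Int) :=
  let ret := acc.1
  let state := acc.2
  let left_pipe := pair.1.2
  let right_pipe := pair.2.2
  let next_state :=
    if ¬((left_pipe, right_pipe) = ("F", "J") ∨ (left_pipe, right_pipe) = ("L", "7"))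
    then pySwitch state else state
  let ret :=
    if state.2 ≠ 0 ∧ next_state.1 ≠ 0 then
      if ¬(right_pipe = "J" ∨ right_pipe = "7") then
        ret + (pair.2.1 - pair.1.1 - 1)
      else ret
    else ret
  (ret, next_state)

-- B's filter predicate, named
def crossP (ab : (Int × String) × (Int × String)) : Bool :=
  decide (¬((ab.1.2, ab.2.2) = ("F", "J") ∨ (ab.1.2, ab.2.2) = ("L", "7")))

-- A's two-bit state as a function of the inside parity
def encState (inside : Bool) : Int × Int := if inside then (0, 1) else (1, 0)

lemma calc_enclosed_as_fold (line : List (Int × String)) :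
    calc_enclosed line = ((line.zip (PySem.List.slice line (some 1) none)).foldl stepA (0, (0, 1))).1 := rfl

lemma calc_enclosed_alt_as_sum (line : List (Int × String)) :
    calc_enclosed_alt line = sumEvenAux ((line.zip (PySem.List.slice line (some 1) none)).filter crossP) 0 := rfl

lemma stepA_cross (ret : Int) (p q : Int × String) (inside : Bool)
    (hc : ¬((p.2, q.2) = ("F", "J") ∨ (p.2, q.2) = ("L", "7"))) :
    stepA (ret, encState inside) (p, q)
      = ((if inside ∧ ¬(q.2 = "J" ∨ q.2 = "7") then ret + (q.1 - p.1 - 1) else ret),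
         encState (!inside)) := by
  cases inside <;>
    simp only [stepA, encState, if_pos hc, Bool.not_true, Bool.not_false, if_true,
      Bool.false_eq_true, false_and, true_and, if_neg (by simp : ¬False)] <;>
    norm_num [pySwitch, PySem.Int.mod, (by decide : Int.fmod 1 2 = 1)]

lemma stepA_exempt (ret : Int) (p q : Int × String) (inside : Bool)
    (hc : (p.2, q.2) = ("F", "J") ∨ (p.2, q.2) = ("L", "7")) :
    stepA (ret, encState inside) (p, q) = (ret, encState inside) := by
  cases inside <;>
    simp only [stepA, encState, if_neg (not_not_intro hc), if_true,
      Bool.false_eq_true] <;> norm_num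

-- Loop invariant: A's fold from parity `inside` computes B's stage-2 sum over the
-- crossing list, skipping its head when currently outside.
lemma loopA : ∀ (pairs : List ((Int × String) × (Int × String))) (ret : Int) (inside : Bool),
    (pairs.foldl stepA (ret, encState inside)).1
      = sumEvenAux ((pairs.filter crossP).drop (if inside then 0 else 1)) ret := by
  intro pairs
  induction pairs with
  | nil => intro ret inside; cases inside <;> simp [sumEvenAux_nil]
  | cons pr rest ih =>
    intro ret inside
    obtain ⟨p, q⟩ := pr
    rw [List.foldl_cons]
    by_cases hc : (p.2, q.2) = ("F", "J") ∨ (p.2, q.2) = ("L", "7")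
    · have hf : crossP (p, q) = false := by
        unfold crossP; exact decide_eq_false (not_not_intro hc)
      have hfil : List.filter crossP ((p, q) :: rest) = List.filter crossP rest := by
        simp [hf]
      rw [stepA_exempt ret p q inside hc, hfil, ih]
    · have hf : crossP (p, q) = true := by
        unfold crossP; exact decide_eq_true hc
      have hfil : List.filter crossP ((p, q) :: rest)
          = (p, q) :: List.filter crossP rest := by
        simp [hf]
      rw [stepA_cross ret p q inside hc, hfil, ih]
      cases inside with
      | true =>
        simp only [Bool.not_true, Bool.false_eq_true, if_false, if_true,
          List.drop_zero, List.drop_one, true_and]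
        rw [sumEvenAux_cons]
        simp [List.drop_one, not_or]
      | false => simp

-- ===== VERDICT =====
theorem calc_enclosed_spec : Claim_equal_calc_enclosed := by
  intro line _
  unfold Spec_calc_enclosed
  rw [calc_enclosed_as_fold, calc_enclosed_alt_as_sum]
  have h := loopA (line.zip (PySem.List.slice line (some 1) none)) 0 true
  simpa [encState] using h
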